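-- pv_equiv track=rewrite | github.com/bodyisnumb/Adventure-of-Codi-2024 | day2/day2.py | is_dampened_safe_report
-- ===== SOURCE A (Python) =====
-- def is_safe_report(report):
--     ascending = all(report[i] <= report[i + 1] for i in range(len(report) - 1))
--     descending = all(report[i] >= report[i + 1] for i in range(len(report) - 1))
--     within_distance = all(1 <= abs(report[i] - report[i + 1]) <= 3 for i in range(len(report) - 1))
--     return (ascending or descending) and within_distance
--
-- def is_dampened_safe_report(report):
--     if len(report) < 3:
--         return False
--     for i in range(len(report)):
--         modified_report = report[:i] + report[i + 1:]
--         if is_safe_report(modified_report):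
--             return True
--     return False
-- ===== SOURCE B (Python) =====
-- def _mono(sign, xs):
--     return all(1 <= sign * (b - a) <= 3 for a, b in zip(xs, xs[1:]))
--
-- def _first_violation(sign, xs):
--     for i, (a, b) in enumerate(zip(xs, xs[1:])):
--         if not (1 <= sign * (b - a) <= 3):
--             return i
--     return None
--
-- def _damp(sign, xs):
--     k = _first_violation(sign, xs)
--     if k is None:
--         return True  # xs already monotone-bounded; removing the first element keeps it so
--     return _mono(sign, xs[:k] + xs[k + 1:]) or _mono(sign, xs[:k + 1] + xs[k + 2:])
--
-- def is_dampened_safe_report(report):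
--     if len(report) < 3:
--         return False
--     return _damp(1, report) or _damp(-1, report)
-- ===== Notes on version B (the rewrite author's own statement) =====
-- stated objective: faster
-- what changed: Instead of trying all n removals and re-checking each candidate with three full passes (A), B makes one pass per direction to find the first violating adjacent pair and tests only the two removals that can repair it.
import Mathlib
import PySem

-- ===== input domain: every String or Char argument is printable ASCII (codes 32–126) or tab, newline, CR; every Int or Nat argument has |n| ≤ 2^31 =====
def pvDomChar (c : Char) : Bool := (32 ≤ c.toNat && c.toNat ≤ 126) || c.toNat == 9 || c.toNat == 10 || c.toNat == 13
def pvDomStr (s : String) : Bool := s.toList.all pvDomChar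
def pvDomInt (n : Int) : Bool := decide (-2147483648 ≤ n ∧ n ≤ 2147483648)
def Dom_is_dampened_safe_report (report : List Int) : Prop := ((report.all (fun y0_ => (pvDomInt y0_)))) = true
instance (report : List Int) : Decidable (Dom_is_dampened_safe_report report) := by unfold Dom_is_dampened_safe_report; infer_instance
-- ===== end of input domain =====

-- B replaces A's try-every-removal O(n^2) scan by a single pass per direction that locates the
-- first violating adjacent pair and tests only the two removals that can repair it (O(n)).


-- ===== PORT A =====
-- is_safe_report: three index-based all(...) passes, then (ascending or descending) and within_distance
def pvSafeA (report : List Int) : Bool :=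
  let ascending := (PySem.List.pyRange 0 ((report.length : Int) - 1) 1).all
    (fun i => PySem.List.pyGetD report i 0 ≤ PySem.List.pyGetD report (i + 1) 0)
  let descending := (PySem.List.pyRange 0 ((report.length : Int) - 1) 1).all
    (fun i => PySem.List.pyGetD report (i + 1) 0 ≤ PySem.List.pyGetD report i 0)
  let within_distance := (PySem.List.pyRange 0 ((report.length : Int) - 1) 1).all
    (fun i => decide (1 ≤ |PySem.List.pyGetD report i 0 - PySem.List.pyGetD report (i + 1) 0|) &&
              decide (|PySem.List.pyGetD report i 0 - PySem.List.pyGetD report (i + 1) 0| ≤ 3))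
  (ascending || descending) && within_distance

def is_dampened_safe_report (report : List Int) : Bool :=
  if report.length < 3 then false
  else
    -- for i in range(len(report)): modified = report[:i] + report[i+1:]; if safe: return True
    (PySem.List.pyRange 0 (report.length : Int) 1).any
      (fun i => pvSafeA (PySem.List.slice report none (some i) ++
                         PySem.List.slice report (some (i + 1)) none))

-- ===== PORT B =====
-- _mono: all(1 <= sign*(b-a) <= 3 for a,b in zip(xs, xs[1:]))   (xs[1:] = tail; indices nonnegative)
def pvMonoB (sign : Int) (xs : List Int) : Bool :=
  (xs.zip xs.tail).all (fun p => decide (1 ≤ sign * (p.2 - p.1)) && decide (sign * (p.2 - p.1) ≤ 3))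

-- _first_violation: first index of a failing adjacent pair (enumerate + early return = findIdx?)
def pvFirstViol (sign : Int) (xs : List Int) : Option Nat :=
  (xs.zip xs.tail).findIdx?
    (fun p => !(decide (1 ≤ sign * (p.2 - p.1)) && decide (sign * (p.2 - p.1) ≤ 3)))

-- _damp: xs[:k]+xs[k+1:] with nonnegative k is take k ++ drop (k+1) (exact here: k ≥ 0)
def pvDamp (sign : Int) (xs : List Int) : Bool :=
  match pvFirstViol sign xs with
  | none => true
  | some k => pvMonoB sign (xs.take k ++ xs.drop (k + 1)) ||
              pvMonoB sign (xs.take (k + 1) ++ xs.drop (k + 2))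

def is_dampened_safe_report_alt (report : List Int) : Bool :=
  if report.length < 3 then false
  else pvDamp 1 report || pvDamp (-1) report

-- ===== PRECONDITION & SPEC =====
def Spec_is_dampened_safe_report (report : List Int) (out : Bool) : Prop := out = is_dampened_safe_report_alt report
instance (report : List Int) (out : Bool) : Decidable (Spec_is_dampened_safe_report report out) := by unfold Spec_is_dampened_safe_report; infer_instance

-- ===== CLAIM (what is proved, stated in full; the proofs are below) =====
def Claim_equal_is_dampened_safe_report : Prop := ∀ (report : List Int), Dom_is_dampened_safe_report report → Spec_is_dampened_safe_report report (is_dampened_safe_report report)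

-- ===== LEMMAS AND PROOFS =====

-- "the adjacent pair (a, b) is good for direction s"
def pvGood2 (s a b : Int) : Prop := 1 ≤ s * (b - a) ∧ s * (b - a) ≤ 3

def pvGood (s : Int) (xs : List Int) (j : Nat) : Prop := pvGood2 s (xs.getD j 0) (xs.getD (j + 1) 0)

lemma zip_tail_getElem (xs : List Int) (j : Nat) (h : j < (xs.zip xs.tail).length) :
    (xs.zip xs.tail)[j] = (xs.getD j 0, xs.getD (j + 1) 0) := by
  have hl : j + 1 < xs.length := by
    simp [List.length_zip, List.length_tail] at h; omega
  rw [List.getElem_zip]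
  rw [List.getD_eq_getElem xs 0 (by omega), List.getD_eq_getElem xs 0 hl]
  congr 1
  rw [List.getElem_tail]

lemma length_zip_tail (xs : List Int) : (xs.zip xs.tail).length = xs.length - 1 := by
  simp [List.length_zip, List.length_tail]

lemma monoB_iff (s : Int) (xs : List Int) :
    pvMonoB s xs = true ↔ ∀ j : Nat, j + 1 < xs.length → pvGood s xs j := by
  unfold pvMonoB
  rw [List.all_eq_true]
  constructor
  · intro h j hj
    have hm : j < (xs.zip xs.tail).length := by rw [length_zip_tail]; omega
    have := h _ (List.getElem_mem hm)
    rw [zip_tail_getElem xs j hm] at this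
    simp only [Bool.and_eq_true, decide_eq_true_eq] at this
    exact this
  · intro h p hp
    obtain ⟨j, hj, rfl⟩ := List.getElem_of_mem hp
    rw [zip_tail_getElem xs j hj]
    have hl : j + 1 < xs.length := by rw [length_zip_tail] at hj; omega
    have hg := h j hl
    simp only [Bool.and_eq_true, decide_eq_true_eq]
    exact hg

lemma firstViol_none_iff (s : Int) (xs : List Int) :
    pvFirstViol s xs = none ↔ pvMonoB s xs = true := by
  unfold pvFirstViol pvMonoB
  rw [List.findIdx?_eq_none_iff, List.all_eq_true]
  constructor
  · intro h p hp; simpa using h p hp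
  · intro h p hp; simpa using h p hp

lemma firstViol_some (s : Int) (xs : List Int) (k : Nat) (h : pvFirstViol s xs = some k) :
    k + 1 < xs.length ∧ (¬ pvGood s xs k) ∧ ∀ j, j < k → pvGood s xs j := by
  unfold pvFirstViol at h
  rw [List.findIdx?_eq_some_iff_getElem] at h
  obtain ⟨hk, hbad, hpre⟩ := h
  rw [zip_tail_getElem xs k hk] at hbad
  refine ⟨by rw [length_zip_tail] at hk; omega, ?_, ?_⟩
  · intro hg
    simp only [Bool.not_eq_eq_eq_not, Bool.not_true, Bool.and_eq_false_iff,
      decide_eq_false_iff_not] at hbad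
    rcases hbad with h1 | h1
    · exact h1 hg.1
    · exact h1 hg.2
  · intro j hj
    have hji := hpre j hj
    simp only [Bool.not_eq_eq_eq_not, Bool.not_true, Bool.not_eq_false] at hji
    rw [zip_tail_getElem xs j (by omega)] at hji
    simp only [Bool.and_eq_true, decide_eq_true_eq] at hji
    exact hji

-- A's pyRange-based all/any, restated over Nat indices
lemma pyRange_all_iff (m : Int) (f : Int → Bool) :
    (PySem.List.pyRange 0 m 1).all f = true ↔ ∀ j : Nat, (j : Int) < m → f (j : Int) = true := by
  rw [List.all_eq_true]
  constructor
  · intro h j hj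
    exact h _ (PySem.List.mem_pyRange_one.mpr ⟨by positivity, hj⟩)
  · intro h i hi
    obtain ⟨h0, hm⟩ := PySem.List.mem_pyRange_one.mp hi
    obtain ⟨j, rfl⟩ := Int.eq_ofNat_of_zero_le h0
    exact h j hm

lemma pyRange_any_iff (m : Int) (f : Int → Bool) :
    (PySem.List.pyRange 0 m 1).any f = true ↔ ∃ j : Nat, (j : Int) < m ∧ f (j : Int) = true := by
  rw [List.any_eq_true]
  constructor
  · rintro ⟨i, hi, hf⟩
    obtain ⟨h0, hm⟩ := PySem.List.mem_pyRange_one.mp hi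
    obtain ⟨j, rfl⟩ := Int.eq_ofNat_of_zero_le h0
    exact ⟨j, hm, hf⟩
  · rintro ⟨j, hm, hf⟩
    exact ⟨(j : Int), PySem.List.mem_pyRange_one.mpr ⟨by positivity, hm⟩, hf⟩

lemma pyGetD_nat (xs : List Int) (j : Nat) :
    PySem.List.pyGetD xs (j : Int) 0 = xs.getD j 0 := by
  simp [pysem]

lemma pyGetD_nat_succ (xs : List Int) (j : Nat) :
    PySem.List.pyGetD xs ((j : Int) + 1) 0 = xs.getD (j + 1) 0 := by
  have h : ((j : Int) + 1) = ((j + 1 : Nat) : Int) := by push_cast; ring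
  rw [h, pyGetD_nat]

-- pvSafeA equals "monotone-bounded up or monotone-bounded down"
lemma safeA_iff (xs : List Int) :
    pvSafeA xs = true ↔ (pvMonoB 1 xs = true ∨ pvMonoB (-1) xs = true) := by
  unfold pvSafeA
  simp only [Bool.and_eq_true, Bool.or_eq_true]
  rw [pyRange_all_iff, pyRange_all_iff, pyRange_all_iff, monoB_iff, monoB_iff]
  constructor
  · rintro ⟨hasc | hdesc, hw⟩
    · left
      intro j hj
      have h1 := hasc j (by omega)
      have h2 := hw j (by omega)
      simp only [pyGetD_nat, pyGetD_nat_succ, Bool.and_eq_true, decide_eq_true_eq] at h1 h2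
      unfold pvGood pvGood2
      rcases abs_cases (xs.getD j 0 - xs.getD (j + 1) 0) with ⟨he, _⟩ | ⟨he, _⟩ <;> omega
    · right
      intro j hj
      have h1 := hdesc j (by omega)
      have h2 := hw j (by omega)
      simp only [pyGetD_nat, pyGetD_nat_succ, Bool.and_eq_true, decide_eq_true_eq] at h1 h2
      unfold pvGood pvGood2
      rcases abs_cases (xs.getD j 0 - xs.getD (j + 1) 0) with ⟨he, _⟩ | ⟨he, _⟩ <;> omega
  · intro h
    rcases h with hm | hm
    · refine ⟨Or.inl ?_, ?_⟩ <;>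
      · intro j hj
        have hg := hm j (by omega)
        unfold pvGood pvGood2 at hg
        simp only [pyGetD_nat, pyGetD_nat_succ, Bool.and_eq_true, decide_eq_true_eq]
        rcases abs_cases (xs.getD j 0 - xs.getD (j + 1) 0) with ⟨he, _⟩ | ⟨he, _⟩ <;> omega
    · refine ⟨Or.inr ?_, ?_⟩ <;>
      · intro j hj
        have hg := hm j (by omega)
        unfold pvGood pvGood2 at hg
        simp only [pyGetD_nat, pyGetD_nat_succ, Bool.and_eq_true, decide_eq_true_eq]
        rcases abs_cases (xs.getD j 0 - xs.getD (j + 1) 0) with ⟨he, _⟩ | ⟨he, _⟩ <;> omega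

-- A's slices build eraseIdx
lemma slice_eraseIdx (xs : List Int) (i : Nat) :
    PySem.List.slice xs none (some (i : Int)) ++ PySem.List.slice xs (some ((i : Int) + 1)) none
      = xs.eraseIdx i := by
  have h1 : PySem.List.slice xs none (some (i : Int)) = xs.take i :=
    PySem.List.slice_to_natCast xs i
  have h2 : ((i : Int) + 1) = ((i + 1 : Nat) : Int) := by push_cast; ring
  rw [h1, h2, PySem.List.slice_from_natCast xs (i + 1)]
  exact (List.eraseIdx_eq_take_drop_succ xs i).symm

lemma getD_eraseIdx (xs : List Int) (i j : Nat) (hj : j < (xs.eraseIdx i).length) :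
    (xs.eraseIdx i).getD j 0 = if j < i then xs.getD j 0 else xs.getD (j + 1) 0 := by
  have hlen := List.length_eraseIdx (l := xs) (i := i)
  rw [List.getD_eq_getElem _ 0 hj, List.getElem_eraseIdx]
  by_cases hji : j < i
  · rw [dif_pos hji, if_pos hji, List.getD_eq_getElem]
  · rw [dif_neg hji, if_neg hji, List.getD_eq_getElem]

lemma length_eraseIdx_of_lt (xs : List Int) (i : Nat) (hi : i < xs.length) :
    (xs.eraseIdx i).length = xs.length - 1 := by
  rw [List.length_eraseIdx, if_pos hi]

-- the core: pvDamp decides "some single removal is monotone-bounded"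
lemma damp_iff (s : Int) (xs : List Int) (hn : 3 ≤ xs.length) :
    pvDamp s xs = true ↔ ∃ i : Nat, i < xs.length ∧ pvMonoB s (xs.eraseIdx i) = true := by
  cases h : pvFirstViol s xs with
  | none =>
    simp only [pvDamp, h]
    constructor
    · intro _
      refine ⟨xs.length - 1, by omega, ?_⟩
      have hmono := (firstViol_none_iff s xs).mp h
      rw [monoB_iff] at hmono
      rw [monoB_iff]
      intro j hj
      have hlen : (xs.eraseIdx (xs.length - 1)).length = xs.length - 1 :=
        length_eraseIdx_of_lt xs _ (by omega)
      rw [hlen] at hj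
      unfold pvGood
      rw [getD_eraseIdx xs _ j (by omega), getD_eraseIdx xs _ (j + 1) (by omega),
        if_pos (by omega), if_pos (by omega)]
      exact hmono j (by omega)
    · intro _; trivial
  | some k =>
    obtain ⟨hk1, hbad, _hpre⟩ := firstViol_some s xs k h
    simp only [pvDamp, h, Bool.or_eq_true]
    rw [← List.eraseIdx_eq_take_drop_succ xs k, ← List.eraseIdx_eq_take_drop_succ xs (k + 1)]
    constructor
    · rintro (hm | hm)
      · exact ⟨k, by omega, hm⟩
      · exact ⟨k + 1, by omega, hm⟩
    · rintro ⟨i, hi, hm⟩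
      by_cases hik : i = k
      · left; rw [← hik]; exact hm
      by_cases hik1 : i = k + 1
      · right; rw [← hik1]; exact hm
      exfalso
      apply hbad
      rw [monoB_iff] at hm
      have hlen : (xs.eraseIdx i).length = xs.length - 1 := length_eraseIdx_of_lt xs i hi
      by_cases hlt : i < k
      · -- pair (k, k+1) sits at position k-1 of the erased list
        have hg := hm (k - 1) (by omega)
        unfold pvGood at hg
        rw [getD_eraseIdx xs i (k - 1) (by omega), getD_eraseIdx xs i ((k - 1) + 1) (by omega),
          if_neg (by omega), if_neg (by omega)] at hg
        have e1 : k - 1 + 1 = k := by omega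
        rw [e1] at hg
        exact hg
      · -- i > k + 1 : pair (k, k+1) sits at position k of the erased list
        have hg := hm k (by omega)
        unfold pvGood at hg
        rw [getD_eraseIdx xs i k (by omega), getD_eraseIdx xs i (k + 1) (by omega),
          if_pos (by omega), if_pos (by omega)] at hg
        exact hg

-- ===== VERDICT (by name: the statement is the Claim_ definition above) =====
theorem is_dampened_safe_report_spec : Claim_equal_is_dampened_safe_report := by
  intro report _
  unfold Spec_is_dampened_safe_report is_dampened_safe_report is_dampened_safe_report_alt
  by_cases hlen : report.length < 3
  · rw [if_pos hlen, if_pos hlen]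
  · rw [if_neg hlen, if_neg hlen]
    have hlen3 : 3 ≤ report.length := by omega
    rw [Bool.eq_iff_iff]
    rw [pyRange_any_iff, Bool.or_eq_true, damp_iff 1 report hlen3, damp_iff (-1) report hlen3]
    constructor
    · rintro ⟨j, hj, hf⟩
      rw [slice_eraseIdx, safeA_iff] at hf
      rcases hf with hf | hf
      · exact Or.inl ⟨j, by omega, hf⟩
      · exact Or.inr ⟨j, by omega, hf⟩
    · rintro (⟨j, hj, hf⟩ | ⟨j, hj, hf⟩)
      · exact ⟨j, by omega, by rw [slice_eraseIdx, safeA_iff]; exact Or.inl hf⟩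
      · exact ⟨j, by omega, by rw [slice_eraseIdx, safeA_iff]; exact Or.inr hf⟩
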